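-- pv_equiv track=rewrite | github.com/katealtonwilliams/AdventOfCode-2024 | day5/day5_solution.py | create_order_map
-- ===== SOURCE A (Python) =====
-- def create_order_map(
--     all_numbers: set[str], orders: list[tuple[str]]
-- ) -> dict[dict[list[str]]]:
--     order_map = {}
--     for number in all_numbers:
--         number_map = {"before": [], "after": []}
--         for pair in orders:
--             if number == pair[0]:
--                 number_map["after"].append(pair[1])
--             if number == pair[1]:
--                 number_map["before"].append(pair[0])
--         order_map[number] = number_map
--     return order_map
-- ===== SOURCE B (Python) =====
-- def create_order_map(all_numbers, orders):
--     befores = {}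
--     afters = {}
--     for pair in orders:
--         afters.setdefault(pair[0], []).append(pair[1])
--         befores.setdefault(pair[1], []).append(pair[0])
--     return {
--         number: {"before": befores.get(number, []), "after": afters.get(number, [])}
--         for number in all_numbers
--     }
-- ===== Notes on version B (the rewrite author's own statement) =====
-- stated objective: faster
-- what changed: Instead of scanning the whole orders list once per number, B makes a single pass over orders building two dicts indexed by each pair's endpoints, then assembles each number's entry by two O(1) lookups.
-- outside the precondition, e.g. on create_order_map(set(), [()]): A returns {}, B raises IndexError
import Mathlib
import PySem

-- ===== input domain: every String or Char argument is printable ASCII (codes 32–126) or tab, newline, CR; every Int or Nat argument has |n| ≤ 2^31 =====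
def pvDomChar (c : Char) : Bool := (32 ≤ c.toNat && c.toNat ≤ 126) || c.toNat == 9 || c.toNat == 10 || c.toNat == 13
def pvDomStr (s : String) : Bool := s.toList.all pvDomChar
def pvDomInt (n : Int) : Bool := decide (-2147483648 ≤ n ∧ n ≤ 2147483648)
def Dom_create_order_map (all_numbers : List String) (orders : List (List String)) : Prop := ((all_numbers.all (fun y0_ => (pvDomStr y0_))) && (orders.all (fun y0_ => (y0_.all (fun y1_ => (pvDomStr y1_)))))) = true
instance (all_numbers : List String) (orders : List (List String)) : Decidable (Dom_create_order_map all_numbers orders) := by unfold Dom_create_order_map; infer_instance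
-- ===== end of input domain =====

-- B replaces A's per-number scan of all orders (O(N·M)) by ONE pass over orders building two
-- endpoint-indexed dicts, then a direct lookup per number (O(N+M)); objective: faster.

-- ===== PORT A =====
def create_order_map (all_numbers : List String) (orders : List (List String)) : List (String × List (String × List String)) :=
  (all_numbers.foldl (fun (order_map : PySem.Dict String (List (String × List String))) number =>
      let number_map : PySem.Dict String (List String) :=
        PySem.Dict.ofList [("before", []), ("after", [])]
      let number_map := orders.foldl (fun (nm : PySem.Dict String (List String)) pair =>
          let nm := if number == (PySem.List.pyGet? pair 0).getD "" then
              nm.modify "after" [] (· ++ [(PySem.List.pyGet? pair 1).getD ""]) else nm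
          if number == (PySem.List.pyGet? pair 1).getD "" then
              nm.modify "before" [] (· ++ [(PySem.List.pyGet? pair 0).getD ""]) else nm)
        number_map
      order_map.insert number number_map.items)
    PySem.Dict.empty).items

-- ===== PORT B =====
def create_order_map_alt (all_numbers : List String) (orders : List (List String)) : List (String × List (String × List String)) :=
  let ba := orders.foldl (fun (p : PySem.Dict String (List String) × PySem.Dict String (List String)) pair =>
      let afters := p.2.modify ((PySem.List.pyGet? pair 0).getD "") [] (· ++ [(PySem.List.pyGet? pair 1).getD ""])
      let befores := p.1.modify ((PySem.List.pyGet? pair 1).getD "") [] (· ++ [(PySem.List.pyGet? pair 0).getD ""])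
      (befores, afters))
    (PySem.Dict.empty, PySem.Dict.empty)
  (all_numbers.foldl (fun (out : PySem.Dict String (List (String × List String))) number =>
      out.insert number [("before", ba.1.getD number []), ("after", ba.2.getD number [])])
    PySem.Dict.empty).items

-- ===== PRECONDITION & SPEC =====
-- Pre_ excludes any orders list containing a pair of length < 2: Python A raises IndexError on
-- those whenever all_numbers is nonempty, and only returns (the empty dict) in the degenerate
-- all_numbers = [] case, where it never inspects orders; B's single pass raises there too.
def Pre_create_order_map (all_numbers : List String) (orders : List (List String)) : Prop :=
  ∀ o ∈ orders, 2 ≤ o.length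
instance (all_numbers : List String) (orders : List (List String)) : Decidable (Pre_create_order_map all_numbers orders) := by unfold Pre_create_order_map; infer_instance
def pvWitness_create_order_map : List String × List (List String) :=
  (["1", "2", "3"], [["1", "2"], ["2", "3"], ["1", "3"]])
def Spec_create_order_map (all_numbers : List String) (orders : List (List String)) (out : List (String × List (String × List String))) : Prop := out = create_order_map_alt all_numbers orders
instance (all_numbers : List String) (orders : List (List String)) (out : List (String × List (String × List String))) : Decidable (Spec_create_order_map all_numbers orders out) := by unfold Spec_create_order_map; infer_instance

-- ===== CLAIM (what is proved, stated in full; the proofs are below) =====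
def Claim_equal_create_order_map : Prop := ∀ (all_numbers : List String) (orders : List (List String)), Dom_create_order_map all_numbers orders → Pre_create_order_map all_numbers orders → Spec_create_order_map all_numbers orders (create_order_map all_numbers orders)

-- ===== LEMMAS AND PROOFS =====

-- the "before"/"after" lists the task associates with a number n
def befL (n : String) (orders : List (List String)) : List String :=
  (orders.filter (fun pair => n == (PySem.List.pyGet? pair 1).getD "")).map
    (fun pair => (PySem.List.pyGet? pair 0).getD "")
def aftL (n : String) (orders : List (List String)) : List String :=
  (orders.filter (fun pair => n == (PySem.List.pyGet? pair 0).getD "")).map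
    (fun pair => (PySem.List.pyGet? pair 1).getD "")

theorem modify_after (x y : List String) (s : String) :
    (PySem.Dict.ofList [("before", x), ("after", y)]).modify "after" [] (· ++ [s]) =
    PySem.Dict.ofList [("before", x), ("after", y ++ [s])] := by rfl

theorem modify_before (x y : List String) (s : String) :
    (PySem.Dict.ofList [("before", x), ("after", y)]).modify "before" [] (· ++ [s]) =
    PySem.Dict.ofList [("before", x ++ [s]), ("after", y)] := by rfl

-- A's inner scan over orders, from an arbitrary two-entry dict
theorem A_inner (n : String) (orders : List (List String)) (b a : List String) :
    orders.foldl (fun (nm : PySem.Dict String (List String)) pair =>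
        let nm := if n == (PySem.List.pyGet? pair 0).getD "" then
            nm.modify "after" [] (· ++ [(PySem.List.pyGet? pair 1).getD ""]) else nm
        if n == (PySem.List.pyGet? pair 1).getD "" then
            nm.modify "before" [] (· ++ [(PySem.List.pyGet? pair 0).getD ""]) else nm)
      (PySem.Dict.ofList [("before", b), ("after", a)]) =
    PySem.Dict.ofList [("before", b ++ befL n orders), ("after", a ++ aftL n orders)] := by
  induction orders generalizing b a with
  | nil => simp [befL, aftL]
  | cons pair rest ih =>
    simp only [List.foldl_cons, befL, aftL, List.filter_cons]
    by_cases h0 : (n == (PySem.List.pyGet? pair 0).getD "") = true <;>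
      by_cases h1 : (n == (PySem.List.pyGet? pair 1).getD "") = true <;>
      simp only [h0, h1, if_true, if_false, Bool.false_eq_true]
    · rw [modify_after, modify_before, ih]; simp [befL, aftL]
    · rw [modify_after, ih]; simp [befL, aftL]
    · rw [modify_before, ih]; simp [befL, aftL]
    · rw [ih]; simp [befL, aftL]

-- splitting B's simultaneous fold, and characterising each component
theorem B_split (orders : List (List String)) (bd ad : PySem.Dict String (List String)) :
    orders.foldl (fun (p : PySem.Dict String (List String) × PySem.Dict String (List String)) pair =>
        let afters := p.2.modify ((PySem.List.pyGet? pair 0).getD "") [] (· ++ [(PySem.List.pyGet? pair 1).getD ""])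
        let befores := p.1.modify ((PySem.List.pyGet? pair 1).getD "") [] (· ++ [(PySem.List.pyGet? pair 0).getD ""])
        (befores, afters)) (bd, ad) =
    (orders.foldl (fun d pair => d.modify ((PySem.List.pyGet? pair 1).getD "") [] (· ++ [(PySem.List.pyGet? pair 0).getD ""])) bd,
     orders.foldl (fun d pair => d.modify ((PySem.List.pyGet? pair 0).getD "") [] (· ++ [(PySem.List.pyGet? pair 1).getD ""])) ad) := by
  induction orders generalizing bd ad with
  | nil => rfl
  | cons pair rest ih => simp only [List.foldl_cons]; exact ih _ _

theorem B_getD (orders : List (List String)) (d : PySem.Dict String (List String))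
    (key val : List String → String) (n : String) :
    (orders.foldl (fun d pair => d.modify (key pair) [] (· ++ [val pair])) d).getD n [] =
      d.getD n [] ++ ((orders.filter (fun pair => n == key pair)).map val) := by
  induction orders generalizing d with
  | nil => simp
  | cons pair rest ih =>
    simp only [List.foldl_cons, List.filter_cons]
    rw [ih]
    by_cases h : (n == key pair) = true
    · have hn : n = key pair := beq_iff_eq.mp h
      simp only [h, if_true, List.map_cons]
      rw [hn, PySem.Dict.getD_modify_self]
      simp
    · simp only [h, Bool.false_eq_true, if_false]
      rw [PySem.Dict.getD_modify_of_ne]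
      exact fun hne => h (by simp [hne])

theorem ofList_items (x y : List String) :
    (PySem.Dict.ofList [("before", x), ("after", y)]).items = [("before", x), ("after", y)] := by rfl

-- pointwise-equal insert loops give equal dicts
theorem foldl_insert_congr {ν : Type} (l : List String) (d : PySem.Dict String ν)
    (v1 v2 : String → ν) (h : ∀ n, v1 n = v2 n) :
    l.foldl (fun om n => om.insert n (v1 n)) d = l.foldl (fun om n => om.insert n (v2 n)) d := by
  induction l generalizing d with
  | nil => rfl
  | cons x xs ih => simp only [List.foldl_cons, h x]; exact ih _

-- ===== VERDICT (by name: the statement is the Claim_ definition above) =====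
theorem create_order_map_spec : Claim_equal_create_order_map := by
  intro all_numbers orders _ _
  unfold Spec_create_order_map create_order_map create_order_map_alt
  simp only [B_split]
  congr 1
  apply foldl_insert_congr
  intro n
  rw [A_inner n orders [] []]
  simp [B_getD, befL, aftL, ofList_items]
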